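-- pv_equiv track=rewrite | github.com/SALAJEV/Busbibliotheek-95 | python/script.py | _deelzoekscore
-- ===== SOURCE A (Python) =====
-- def _toon_voertuignummer(voertuignummer):
--     """Verwijder interne letterprefix bij weergave aan de gebruiker."""
--     if voertuignummer and len(voertuignummer) > 1 and voertuignummer[0].isalpha():
--         return voertuignummer[1:]
--     return voertuignummer
--
-- def _normaliseer_zoekwaarde(waarde):
--     """Maak een waarde vergelijkbaar voor deelzoekingen."""
--     waarde = (waarde or "").strip().casefold()
--     for teken in (" ", "-", ".", "/", "(", ")"):
--         waarde = waarde.replace(teken, "")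
--     return waarde
--
-- def _deelzoekscore(bus, zoekterm_norm):
--     """Geef een score terug voor deelzoeking; lager is beter."""
--     kandidaten = [
--         (0, _toon_voertuignummer(bus.get("vehicle_id", "").strip())),
--         (1, bus.get("vehicle_id", "")),
--         (2, bus.get("license_plate", "")),
--         (3, bus.get("hansea_id", "")),
--         (4, bus.get("intern_id", "")),
--         (5, bus.get("old_vehicle_id", "")),
--         (6, bus.get("old_license_plate", "")),
--         (7, bus.get("owner", "")),
--         (8, bus.get("bus", "")),
--     ]
--
--     beste_score = None
--     for prioriteit, waarde in kandidaten:
--         waarde_norm = _normaliseer_zoekwaarde(waarde)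
--         if not waarde_norm:
--             continue
--         if waarde_norm == zoekterm_norm:
--             score = (0, prioriteit, len(waarde_norm))
--         elif waarde_norm.startswith(zoekterm_norm):
--             score = (1, prioriteit, len(waarde_norm))
--         elif zoekterm_norm in waarde_norm:
--             score = (2, prioriteit, len(waarde_norm))
--         else:
--             continue
--         if beste_score is None or score < beste_score:
--             beste_score = score
--     return beste_score
-- ===== SOURCE B (Python) =====
-- def _toon_voertuignummer(voertuignummer):
--     """Verwijder interne letterprefix bij weergave aan de gebruiker."""
--     if voertuignummer and len(voertuignummer) > 1 and voertuignummer[0].isalpha():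
--         return voertuignummer[1:]
--     return voertuignummer
--
-- def _normaliseer_zoekwaarde(waarde):
--     """Maak een waarde vergelijkbaar voor deelzoekingen."""
--     waarde = (waarde or "").strip().casefold()
--     for teken in (" ", "-", ".", "/", "(", ")"):
--         waarde = waarde.replace(teken, "")
--     return waarde
--
-- def _genormaliseerd(kandidaten):
--     """Normaliseer elke kandidaatwaarde en laat lege waarden weg."""
--     genorm = [(p, _normaliseer_zoekwaarde(w)) for p, w in kandidaten]
--     return [(p, v) for p, v in genorm if v]
--
-- def _tier_kandidaten(genorm, test):
--     """De (prioriteit, lengte)-paren van de waarden die deze test halen."""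
--     return [(p, len(v)) for p, v in genorm if test(v)]
--
-- def _deelzoekscore(bus, zoekterm_norm):
--     """Geef een score terug voor deelzoeking; lager is beter."""
--     kandidaten = [
--         (0, _toon_voertuignummer(bus.get("vehicle_id", "").strip())),
--         (1, bus.get("vehicle_id", "")),
--         (2, bus.get("license_plate", "")),
--         (3, bus.get("hansea_id", "")),
--         (4, bus.get("intern_id", "")),
--         (5, bus.get("old_vehicle_id", "")),
--         (6, bus.get("old_license_plate", "")),
--         (7, bus.get("owner", "")),
--         (8, bus.get("bus", "")),
--     ]
--     genorm = _genormaliseerd(kandidaten)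
--     for rang, test in (
--         (0, lambda v: v == zoekterm_norm),
--         (1, lambda v: v.startswith(zoekterm_norm)),
--         (2, lambda v: zoekterm_norm in v),
--     ):
--         treffers = _tier_kandidaten(genorm, test)
--         if treffers:
--             prioriteit, lengte = min(treffers)
--             return (rang, prioriteit, lengte)
--     return None
-- ===== Notes on version B (the rewrite author's own statement) =====
-- stated objective: alternative
-- what changed: Replaces the single loop that threads a running best (match-rank, priority, length) triple through all nine candidates by three tiered passes: normalize once, then return for the first non-empty tier (exact, prefix, substring) the minimum (priority, length) pair tagged with the tier rank.
import Mathlib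
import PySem

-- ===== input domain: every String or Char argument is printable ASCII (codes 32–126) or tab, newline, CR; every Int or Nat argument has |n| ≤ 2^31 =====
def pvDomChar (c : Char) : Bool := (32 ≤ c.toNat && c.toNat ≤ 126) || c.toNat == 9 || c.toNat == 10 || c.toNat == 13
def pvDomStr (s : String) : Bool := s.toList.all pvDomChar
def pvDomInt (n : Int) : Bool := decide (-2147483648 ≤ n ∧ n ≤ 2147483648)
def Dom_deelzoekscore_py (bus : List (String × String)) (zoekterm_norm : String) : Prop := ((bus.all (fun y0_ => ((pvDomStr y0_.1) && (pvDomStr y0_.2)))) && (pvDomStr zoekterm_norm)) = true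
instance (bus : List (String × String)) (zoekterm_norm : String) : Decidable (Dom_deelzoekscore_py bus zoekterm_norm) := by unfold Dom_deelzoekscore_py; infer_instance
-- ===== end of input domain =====

-- B replaces A's single best-tracking loop by three tiered passes (exact / prefix / substring),
-- returning the minimum (priority, length) pair of the first non-empty tier; same result, same cost.

-- ===== shared helpers (both Pythons use the identical _toon_voertuignummer /
-- _normaliseer_zoekwaarde helpers and build the identical 9-element candidate list) =====

def toonVoertuignummer (v : String) : String :=
  if (!(v == "")) && decide (1 < PySem.Str.len v) &&
     ((PySem.Str.pyGet? v 0).map PySem.Chars.isalpha).getD false then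
    PySem.Str.slice v (some 1) none
  else v

-- .casefold() agrees with .lower() on the ASCII input domain
def normZoek (w : String) : String :=
  [" ", "-", ".", "/", "(", ")"].foldl (fun s t => PySem.Str.replace s t "")
    (PySem.Str.lower (PySem.Str.strip w))

def busGet (bus : List (String × String)) (k : String) : String :=
  (PySem.Dict.mk bus).getD k ""

def kandidaten (bus : List (String × String)) : List (Int × String) :=
  [ (0, toonVoertuignummer (PySem.Str.strip (busGet bus "vehicle_id"))),
    (1, busGet bus "vehicle_id"),
    (2, busGet bus "license_plate"),
    (3, busGet bus "hansea_id"),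
    (4, busGet bus "intern_id"),
    (5, busGet bus "old_vehicle_id"),
    (6, busGet bus "old_license_plate"),
    (7, busGet bus "owner"),
    (8, busGet bus "bus") ]

-- Python's '<' on (int, int) and (int, int, int) tuples: lexicographic
def pyLt2 (a b : Int × Int) : Bool :=
  decide (a.1 < b.1) || (decide (a.1 = b.1) && decide (a.2 < b.2))

def pyLt3 (a b : Int × Int × Int) : Bool :=
  decide (a.1 < b.1) || (decide (a.1 = b.1) && pyLt2 a.2 b.2)

-- ===== PORT A =====

def scoreStap (z : String) (best : Option (Int × Int × Int)) (pw : Int × String) :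
    Option (Int × Int × Int) :=
  let vn := normZoek pw.2
  if vn == "" then best
  else
    let score : Option (Int × Int × Int) :=
      if vn == z then some (0, pw.1, PySem.Str.len vn)
      else if PySem.Str.startswith vn z then some (1, pw.1, PySem.Str.len vn)
      else if PySem.Str.isIn z vn then some (2, pw.1, PySem.Str.len vn)
      else none
    match score with
    | none => best
    | some s =>
      match best with
      | none => some s
      | some b => if pyLt3 s b then some s else some b

def deelzoekscore_py (bus : List (String × String)) (zoekterm_norm : String) :
    Option (Int × Int × Int) :=
  (kandidaten bus).foldl (scoreStap zoekterm_norm) none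

-- ===== PORT B =====

-- hand port of Python's min() over a list of (int, int) tuples (lexicographic, first minimum)
def minTreffer (l : List (Int × Int)) : Option (Int × Int) :=
  l.foldl (fun m x =>
    match m with
    | none => some x
    | some b => if pyLt2 x b then some x else some b) none

def tierKandidaten (genorm : List (Int × String)) (test : String → Bool) : List (Int × Int) :=
  (genorm.filter (fun pv => test pv.2)).map (fun pv => (pv.1, PySem.Str.len pv.2))

-- normalize every candidate value, then drop the empty ones
def genormeerd (kand : List (Int × String)) : List (Int × String) :=
  (kand.map (fun pw => (pw.1, normZoek pw.2))).filter (fun pv => !(pv.2 == ""))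

def deelzoekscore_py_alt (bus : List (String × String)) (zoekterm_norm : String) :
    Option (Int × Int × Int) :=
  match minTreffer (tierKandidaten (genormeerd (kandidaten bus))
      (fun v => v == zoekterm_norm)) with
  | some m => some (0, m.1, m.2)
  | none =>
    match minTreffer (tierKandidaten (genormeerd (kandidaten bus))
        (fun v => PySem.Str.startswith v zoekterm_norm)) with
    | some m => some (1, m.1, m.2)
    | none =>
      match minTreffer (tierKandidaten (genormeerd (kandidaten bus))
          (fun v => PySem.Str.isIn zoekterm_norm v)) with
      | some m => some (2, m.1, m.2)
      | none => none

-- ===== PRECONDITION & SPEC =====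
def Spec_deelzoekscore_py (bus : List (String × String)) (zoekterm_norm : String) (out : Option (Int × Int × Int)) : Prop := out = deelzoekscore_py_alt bus zoekterm_norm
instance (bus : List (String × String)) (zoekterm_norm : String) (out : Option (Int × Int × Int)) : Decidable (Spec_deelzoekscore_py bus zoekterm_norm out) := by unfold Spec_deelzoekscore_py; infer_instance

-- ===== CLAIM (what is proved, stated in full; the proofs are below) =====
def Claim_equal_deelzoekscore_py : Prop := ∀ (bus : List (String × String)) (zoekterm_norm : String), Dom_deelzoekscore_py bus zoekterm_norm → Spec_deelzoekscore_py bus zoekterm_norm (deelzoekscore_py bus zoekterm_norm)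

-- ===== LEMMAS AND PROOFS =====

-- the score A assigns to an already-normalized (priority, value) pair (none = 'continue')
def scO (z : String) (pv : Int × String) : Option (Int × Int × Int) :=
  if pv.2 == "" then none
  else if pv.2 == z then some (0, pv.1, PySem.Str.len pv.2)
  else if PySem.Str.startswith pv.2 z then some (1, pv.1, PySem.Str.len pv.2)
  else if PySem.Str.isIn z pv.2 then some (2, pv.1, PySem.Str.len pv.2)
  else none

-- A's running-best update on an already-computed score
def upd3 (b : Option (Int × Int × Int)) (s : Int × Int × Int) : Option (Int × Int × Int) :=
  match b with
  | none => some s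
  | some b => if pyLt3 s b then some s else some b

theorem scoreStap_eq (z : String) (best : Option (Int × Int × Int)) (pw : Int × String) :
    scoreStap z best pw =
      match scO z (pw.1, normZoek pw.2) with
      | none => best
      | some s => upd3 best s := by
  unfold scoreStap scO upd3
  generalize normZoek pw.2 = v
  cases h : (v == "") <;>
    simp only [h, Bool.false_eq_true, if_false, if_true]

theorem foldl_scoreStap_eq (z : String) (l : List (Int × String)) (b : Option (Int × Int × Int)) :
    l.foldl (scoreStap z) b =
      ((l.map (fun pw => (pw.1, normZoek pw.2))).filterMap (scO z)).foldl upd3 b := by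
  induction l generalizing b with
  | nil => rfl
  | cons x l ih =>
    simp only [List.foldl_cons, List.map_cons, List.filterMap_cons, scoreStap_eq]
    cases h : scO z (x.1, normZoek x.2)
    · exact ih _
    · rw [List.foldl_cons]; exact ih _

theorem pyLt2_irrefl (a : Int × Int) : pyLt2 a a = false := by simp [pyLt2]

theorem pyLt2_trans (a b c : Int × Int) :
    pyLt2 a b = true → pyLt2 b c = true → pyLt2 a c = true := by simp [pyLt2]; omega

theorem pyLt2_conn (a b : Int × Int) :
    pyLt2 a b = false → pyLt2 b a = false → a = b := by
  obtain ⟨a1, a2⟩ := a; obtain ⟨b1, b2⟩ := b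
  simp [pyLt2, Prod.ext_iff]; omega

theorem pyLt3_irrefl (a : Int × Int × Int) : pyLt3 a a = false := by simp [pyLt3, pyLt2]

theorem pyLt3_trans (a b c : Int × Int × Int) :
    pyLt3 a b = true → pyLt3 b c = true → pyLt3 a c = true := by simp [pyLt3, pyLt2]; omega

theorem pyLt3_conn (a b : Int × Int × Int) :
    pyLt3 a b = false → pyLt3 b a = false → a = b := by
  obtain ⟨a1, a2, a3⟩ := a; obtain ⟨b1, b2, b3⟩ := b
  simp [pyLt3, pyLt2, Prod.ext_iff]; omega

theorem pyLt3_tier_ge (t t' a b c d : Int) (h : t' < t) :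
    pyLt3 (t, a, b) (t', c, d) = false := by simp [pyLt3, pyLt2]; omega

theorem pyLt3_tier_eq (t a b c d : Int) :
    pyLt3 (t, a, b) (t, c, d) = pyLt2 (a, b) (c, d) := by simp [pyLt3, pyLt2]

-- minimal element of a list with respect to a strict order
def IsMinOf {α : Type} (lt : α → α → Bool) (L : List α) (m : α) : Prop :=
  m ∈ L ∧ ∀ x ∈ L, lt x m = false

def minAcc {α : Type} (lt : α → α → Bool) (b : α) (L : List α) : α :=
  L.foldl (fun acc x => if lt x acc then x else acc) b

theorem minAcc_cons {α : Type} (lt : α → α → Bool) (b y : α) (L : List α) :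
    minAcc lt b (y :: L) = minAcc lt (if lt y b then y else b) L := rfl

theorem pvMinFold_spec {α : Type} (lt : α → α → Bool)
    (hirr : ∀ a, lt a a = false)
    (htr : ∀ a b c, lt a b = true → lt b c = true → lt a c = true)
    (hconn : ∀ a b, lt a b = false → lt b a = false → a = b) :
    ∀ (L : List α) (b : α), IsMinOf lt (b :: L) (minAcc lt b L) := by
  intro L
  induction L with
  | nil => intro b; exact ⟨by simp [minAcc], by simpa [minAcc] using hirr b⟩
  | cons y L ih =>
    intro b
    rw [minAcc_cons]
    by_cases hyb : lt y b = true
    · rw [if_pos hyb]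
      obtain ⟨hmem, hmin⟩ := ih y
      refine ⟨List.mem_cons_of_mem _ hmem, ?_⟩
      intro x hx
      rcases List.mem_cons.mp hx with rfl | hx'
      · by_contra hbm
        have hbm' : lt x (minAcc lt y L) = true := by simpa using hbm
        have := htr y x _ hyb hbm'
        rw [hmin y (List.mem_cons_self)] at this
        exact absurd this (by simp)
      · exact hmin x hx'
    · rw [if_neg hyb]
      replace hyb : lt y b = false := eq_false_of_ne_true hyb
      obtain ⟨hmem, hmin⟩ := ih b
      refine ⟨?_, ?_⟩
      · rcases List.mem_cons.mp hmem with h | h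
        · rw [h]; exact List.mem_cons_self
        · exact List.mem_cons_of_mem _ (List.mem_cons_of_mem _ h)
      intro x hx
      rcases List.mem_cons.mp hx with rfl | hx'
      · exact hmin x List.mem_cons_self
      rcases List.mem_cons.mp hx' with rfl | hx''
      · by_contra hym
        have hym' : lt x (minAcc lt b L) = true := by simpa using hym
        by_cases hbx : lt b x = true
        · have := htr b x _ hbx hym'
          rw [hmin b List.mem_cons_self] at this
          exact absurd this (by simp)
        · have hxb : x = b := hconn x b hyb (eq_false_of_ne_true hbx)
          rw [hxb, hmin b List.mem_cons_self] at hym'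
          exact absurd hym' (by simp)
      · exact hmin x (List.mem_cons_of_mem _ hx'')

theorem minTreffer_some_fold (l : List (Int × Int)) (b : Int × Int) :
    l.foldl (fun m x =>
      match m with
      | none => some x
      | some b => if pyLt2 x b then some x else some b) (some b) =
    some (minAcc pyLt2 b l) := by
  induction l generalizing b with
  | nil => rfl
  | cons y l ih =>
    rw [minAcc_cons]
    by_cases h : pyLt2 y b = true <;>
      simp only [List.foldl_cons, h, if_true, Bool.false_eq_true, if_false]
    · exact ih y
    · exact ih b

theorem minTreffer_spec (x : Int × Int) (l : List (Int × Int)) :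
    ∃ m, minTreffer (x :: l) = some m ∧ IsMinOf pyLt2 (x :: l) m := by
  refine ⟨_, ?_, pvMinFold_spec pyLt2 pyLt2_irrefl pyLt2_trans pyLt2_conn l x⟩
  simp only [minTreffer, List.foldl_cons]
  exact minTreffer_some_fold l x

theorem upd3_some_fold (L : List (Int × Int × Int)) (b : Int × Int × Int) :
    L.foldl upd3 (some b) = some (minAcc pyLt3 b L) := by
  induction L generalizing b with
  | nil => rfl
  | cons y L ih =>
    rw [minAcc_cons]
    by_cases h : pyLt3 y b = true <;>
      simp only [List.foldl_cons, upd3, h, if_true, Bool.false_eq_true, if_false]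
    · exact ih y
    · exact ih b

theorem upd3_spec (x : Int × Int × Int) (L : List (Int × Int × Int)) :
    ∃ m, (x :: L).foldl upd3 none = some m ∧ IsMinOf pyLt3 (x :: L) m := by
  refine ⟨_, ?_, pvMinFold_spec pyLt3 pyLt3_irrefl pyLt3_trans pyLt3_conn L x⟩
  simp only [List.foldl_cons, upd3]
  exact upd3_some_fold L x

theorem isMin_unique {α : Type} (lt : α → α → Bool)
    (hconn : ∀ a b, lt a b = false → lt b a = false → a = b)
    {L : List α} {m₁ m₂ : α} (h₁ : IsMinOf lt L m₁) (h₂ : IsMinOf lt L m₂) : m₁ = m₂ :=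
  hconn m₁ m₂ (h₂.2 m₁ h₁.1) (h₁.2 m₂ h₂.1)

theorem mem_tierKandidaten (G : List (Int × String)) (test : String → Bool) (m : Int × Int) :
    m ∈ tierKandidaten G test ↔
      ∃ pv, pv ∈ G ∧ test pv.2 = true ∧ m = (pv.1, PySem.Str.len pv.2) := by
  simp only [tierKandidaten, List.mem_map, List.mem_filter]
  constructor
  · rintro ⟨pv, ⟨hG, ht⟩, rfl⟩; exact ⟨pv, hG, ht, rfl⟩
  · rintro ⟨pv, hG, ht, rfl⟩; exact ⟨pv, ⟨hG, ht⟩, rfl⟩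

theorem scO_inv (z : String) (pv : Int × String) (s : Int × Int × Int)
    (h : scO z pv = some s) :
    (pv.2 == "") = false ∧
    ((pv.2 == z) = true ∧ s = (0, pv.1, PySem.Str.len pv.2) ∨
     (pv.2 == z) = false ∧ PySem.Str.startswith pv.2 z = true ∧
       s = (1, pv.1, PySem.Str.len pv.2) ∨
     (pv.2 == z) = false ∧ PySem.Str.startswith pv.2 z = false ∧
       PySem.Str.isIn z pv.2 = true ∧ s = (2, pv.1, PySem.Str.len pv.2)) := by
  unfold scO at h
  split_ifs at h with h1 h2 h3 h4
  · exact ⟨eq_false_of_ne_true h1, Or.inl ⟨h2, (Option.some.inj h).symm⟩⟩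
  · exact ⟨eq_false_of_ne_true h1,
      Or.inr (Or.inl ⟨eq_false_of_ne_true h2, h3, (Option.some.inj h).symm⟩)⟩
  · exact ⟨eq_false_of_ne_true h1,
      Or.inr (Or.inr ⟨eq_false_of_ne_true h2, eq_false_of_ne_true h3, h4,
        (Option.some.inj h).symm⟩)⟩

theorem scO_eq0 (z : String) (pv : Int × String)
    (h1 : (pv.2 == "") = false) (h2 : (pv.2 == z) = true) :
    scO z pv = some (0, pv.1, PySem.Str.len pv.2) := by
  unfold scO; rw [h1, h2]; simp

theorem scO_eq1 (z : String) (pv : Int × String)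
    (h1 : (pv.2 == "") = false) (h2 : (pv.2 == z) = false)
    (h3 : PySem.Str.startswith pv.2 z = true) :
    scO z pv = some (1, pv.1, PySem.Str.len pv.2) := by
  unfold scO; rw [h1, h2, h3]; simp

theorem scO_eq2 (z : String) (pv : Int × String)
    (h1 : (pv.2 == "") = false) (h2 : (pv.2 == z) = false)
    (h3 : PySem.Str.startswith pv.2 z = false) (h4 : PySem.Str.isIn z pv.2 = true) :
    scO z pv = some (2, pv.1, PySem.Str.len pv.2) := by
  unfold scO; rw [h1, h2, h3, h4]; simp

-- eq implies startswith (used to move a tier-0 witness into the prefix tier)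
theorem startswith_self (v : String) : PySem.Str.startswith v v = true := by
  simp [PySem.Chars.startswith_iff]

-- the core: A's running minimum over the scored list equals B's tiered selection,
-- for ANY candidate list L of already-normalized values
theorem tiered_eq (z : String) (L : List (Int × String)) :
    (L.filterMap (scO z)).foldl upd3 none =
      (match minTreffer (tierKandidaten (L.filter (fun pv => !(pv.2 == "")))
          (fun v => v == z)) with
       | some m => some (0, m.1, m.2)
       | none =>
         match minTreffer (tierKandidaten (L.filter (fun pv => !(pv.2 == "")))
             (fun v => PySem.Str.startswith v z)) with
         | some m => some (1, m.1, m.2)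
         | none =>
           match minTreffer (tierKandidaten (L.filter (fun pv => !(pv.2 == "")))
               (fun v => PySem.Str.isIn z v)) with
           | some m => some (2, m.1, m.2)
           | none => none) := by
  have memG : ∀ pv : Int × String,
      pv ∈ L.filter (fun pv => !(pv.2 == "")) ↔ pv ∈ L ∧ (pv.2 == "") = false := by
    intro pv
    rw [List.mem_filter, Bool.not_eq_true']
  cases hE : tierKandidaten (L.filter (fun pv => !(pv.2 == ""))) (fun v => v == z) with
  | cons e es =>
    obtain ⟨m, hmt, hmMem, hmMin⟩ := minTreffer_spec e es
    obtain ⟨m1, m2⟩ := m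
    rw [hmt]
    -- source of the tier-0 minimum
    obtain ⟨pv, hpvG, ht0, hmeq⟩ :=
      (mem_tierKandidaten _ _ (m1, m2)).mp (hE ▸ hmMem)
    obtain ⟨hpvL, hne⟩ := (memG pv).mp hpvG
    have hsc : scO z pv = some (0, m1, m2) := by
      rw [scO_eq0 z pv hne ht0, hmeq]
    have hMem3 : (0, m1, m2) ∈ L.filterMap (scO z) :=
      List.mem_filterMap.mpr ⟨pv, hpvL, hsc⟩
    have hMin3 : ∀ x ∈ L.filterMap (scO z), pyLt3 x (0, m1, m2) = false := by
      intro x hx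
      obtain ⟨pv', hL', hsc'⟩ := List.mem_filterMap.mp hx
      obtain ⟨hne', hcases⟩ := scO_inv z pv' x hsc'
      rcases hcases with ⟨h2, rfl⟩ | ⟨h2, h3, rfl⟩ | ⟨h2, h3, h4, rfl⟩
      · have hmem0 : (pv'.1, PySem.Str.len pv'.2) ∈
            tierKandidaten (L.filter (fun pv => !(pv.2 == ""))) (fun v => v == z) :=
          (mem_tierKandidaten _ _ _).mpr ⟨pv', (memG pv').mpr ⟨hL', hne'⟩, h2, rfl⟩
        rw [hE] at hmem0
        rw [pyLt3_tier_eq]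
        exact hmMin _ hmem0
      · exact pyLt3_tier_ge 1 0 _ _ _ _ (by norm_num)
      · exact pyLt3_tier_ge 2 0 _ _ _ _ (by norm_num)
    cases hLS : L.filterMap (scO z) with
    | nil => rw [hLS] at hMem3; exact absurd hMem3 (List.not_mem_nil)
    | cons s ls =>
      obtain ⟨mA, hA, hAspec⟩ := upd3_spec s ls
      rw [hA]
      rw [hLS] at hMem3 hMin3
      rw [isMin_unique pyLt3 pyLt3_conn hAspec ⟨hMem3, hMin3⟩]
  | nil =>
    cases hP : tierKandidaten (L.filter (fun pv => !(pv.2 == "")))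
        (fun v => PySem.Str.startswith v z) with
    | cons p ps =>
      obtain ⟨m, hmt, hmMem, hmMin⟩ := minTreffer_spec p ps
      obtain ⟨m1, m2⟩ := m
      rw [hmt]
      obtain ⟨pv, hpvG, ht1, hmeq⟩ :=
        (mem_tierKandidaten _ _ (m1, m2)).mp (hP ▸ hmMem)
      obtain ⟨hpvL, hne⟩ := (memG pv).mp hpvG
      have hneq : (pv.2 == z) = false := by
        by_contra hzz
        replace hzz : (pv.2 == z) = true := by
          cases h : (pv.2 == z) with
          | false => exact absurd h hzz
          | true => rfl
        have : (pv.1, PySem.Str.len pv.2) ∈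
            tierKandidaten (L.filter (fun pv => !(pv.2 == ""))) (fun v => v == z) :=
          (mem_tierKandidaten _ _ _).mpr ⟨pv, hpvG, hzz, rfl⟩
        rw [hE] at this
        exact absurd this (List.not_mem_nil)
      have hsc : scO z pv = some (1, m1, m2) := by
        rw [scO_eq1 z pv hne hneq ht1, hmeq]
      have hMem3 : (1, m1, m2) ∈ L.filterMap (scO z) :=
        List.mem_filterMap.mpr ⟨pv, hpvL, hsc⟩
      have hMin3 : ∀ x ∈ L.filterMap (scO z), pyLt3 x (1, m1, m2) = false := by
        intro x hx
        obtain ⟨pv', hL', hsc'⟩ := List.mem_filterMap.mp hx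
        obtain ⟨hne', hcases⟩ := scO_inv z pv' x hsc'
        rcases hcases with ⟨h2, rfl⟩ | ⟨h2, h3, rfl⟩ | ⟨h2, h3, h4, rfl⟩
        · have hmem0 : (pv'.1, PySem.Str.len pv'.2) ∈
              tierKandidaten (L.filter (fun pv => !(pv.2 == ""))) (fun v => v == z) :=
            (mem_tierKandidaten _ _ _).mpr ⟨pv', (memG pv').mpr ⟨hL', hne'⟩, h2, rfl⟩
          rw [hE] at hmem0
          exact absurd hmem0 (List.not_mem_nil)
        · have hmem1 : (pv'.1, PySem.Str.len pv'.2) ∈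
              tierKandidaten (L.filter (fun pv => !(pv.2 == "")))
                (fun v => PySem.Str.startswith v z) :=
            (mem_tierKandidaten _ _ _).mpr ⟨pv', (memG pv').mpr ⟨hL', hne'⟩, h3, rfl⟩
          rw [hP] at hmem1
          rw [pyLt3_tier_eq]
          exact hmMin _ hmem1
        · exact pyLt3_tier_ge 2 1 _ _ _ _ (by norm_num)
      cases hLS : L.filterMap (scO z) with
      | nil => rw [hLS] at hMem3; exact absurd hMem3 (List.not_mem_nil)
      | cons s ls =>
        obtain ⟨mA, hA, hAspec⟩ := upd3_spec s ls
        rw [hA]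
        rw [hLS] at hMem3 hMin3
        rw [isMin_unique pyLt3 pyLt3_conn hAspec ⟨hMem3, hMin3⟩]
        rfl
    | nil =>
      cases hS : tierKandidaten (L.filter (fun pv => !(pv.2 == "")))
          (fun v => PySem.Str.isIn z v) with
      | cons s0 ss =>
        obtain ⟨m, hmt, hmMem, hmMin⟩ := minTreffer_spec s0 ss
        obtain ⟨m1, m2⟩ := m
        rw [hmt]
        obtain ⟨pv, hpvG, ht2, hmeq⟩ :=
          (mem_tierKandidaten _ _ (m1, m2)).mp (hS ▸ hmMem)
        obtain ⟨hpvL, hne⟩ := (memG pv).mp hpvG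
        have hsw : PySem.Str.startswith pv.2 z = false := by
          by_contra hzz
          replace hzz : PySem.Str.startswith pv.2 z = true := by
            cases h : PySem.Str.startswith pv.2 z with
            | false => exact absurd h hzz
            | true => rfl
          have : (pv.1, PySem.Str.len pv.2) ∈
              tierKandidaten (L.filter (fun pv => !(pv.2 == "")))
                (fun v => PySem.Str.startswith v z) :=
            (mem_tierKandidaten _ _ _).mpr ⟨pv, hpvG, hzz, rfl⟩
          rw [hP] at this
          exact absurd this (List.not_mem_nil)
        have hneq : (pv.2 == z) = false := by
          by_contra hzz
          replace hzz : (pv.2 == z) = true := by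
            cases h : (pv.2 == z) with
            | false => exact absurd h hzz
            | true => rfl
          have hveq : pv.2 = z := by simpa using hzz
          rw [← hveq] at hsw
          rw [startswith_self pv.2] at hsw
          exact absurd hsw (by simp)
        have hsc : scO z pv = some (2, m1, m2) := by
          rw [scO_eq2 z pv hne hneq hsw ht2, hmeq]
        have hMem3 : (2, m1, m2) ∈ L.filterMap (scO z) :=
          List.mem_filterMap.mpr ⟨pv, hpvL, hsc⟩
        have hMin3 : ∀ x ∈ L.filterMap (scO z), pyLt3 x (2, m1, m2) = false := by
          intro x hx
          obtain ⟨pv', hL', hsc'⟩ := List.mem_filterMap.mp hx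
          obtain ⟨hne', hcases⟩ := scO_inv z pv' x hsc'
          rcases hcases with ⟨h2, rfl⟩ | ⟨h2, h3, rfl⟩ | ⟨h2, h3, h4, rfl⟩
          · have hmem0 : (pv'.1, PySem.Str.len pv'.2) ∈
                tierKandidaten (L.filter (fun pv => !(pv.2 == ""))) (fun v => v == z) :=
              (mem_tierKandidaten _ _ _).mpr ⟨pv', (memG pv').mpr ⟨hL', hne'⟩, h2, rfl⟩
            rw [hE] at hmem0
            exact absurd hmem0 (List.not_mem_nil)
          · have hmem1 : (pv'.1, PySem.Str.len pv'.2) ∈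
                tierKandidaten (L.filter (fun pv => !(pv.2 == "")))
                  (fun v => PySem.Str.startswith v z) :=
              (mem_tierKandidaten _ _ _).mpr ⟨pv', (memG pv').mpr ⟨hL', hne'⟩, h3, rfl⟩
            rw [hP] at hmem1
            exact absurd hmem1 (List.not_mem_nil)
          · have hmem2 : (pv'.1, PySem.Str.len pv'.2) ∈
                tierKandidaten (L.filter (fun pv => !(pv.2 == "")))
                  (fun v => PySem.Str.isIn z v) :=
              (mem_tierKandidaten _ _ _).mpr ⟨pv', (memG pv').mpr ⟨hL', hne'⟩, h4, rfl⟩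
            rw [hS] at hmem2
            rw [pyLt3_tier_eq]
            exact hmMin _ hmem2
        cases hLS : L.filterMap (scO z) with
        | nil => rw [hLS] at hMem3; exact absurd hMem3 (List.not_mem_nil)
        | cons s ls =>
          obtain ⟨mA, hA, hAspec⟩ := upd3_spec s ls
          rw [hA]
          rw [hLS] at hMem3 hMin3
          rw [isMin_unique pyLt3 pyLt3_conn hAspec ⟨hMem3, hMin3⟩]
          rfl
      | nil =>
        cases hLS : L.filterMap (scO z) with
        | nil => rfl
        | cons s ls =>
          exfalso
          have hsmem : s ∈ L.filterMap (scO z) := by rw [hLS]; exact List.mem_cons_self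
          obtain ⟨pv', hL', hsc'⟩ := List.mem_filterMap.mp hsmem
          obtain ⟨hne', hcases⟩ := scO_inv z pv' s hsc'
          rcases hcases with ⟨h2, _⟩ | ⟨h2, h3, _⟩ | ⟨h2, h3, h4, _⟩
          · have : (pv'.1, PySem.Str.len pv'.2) ∈
                tierKandidaten (L.filter (fun pv => !(pv.2 == ""))) (fun v => v == z) :=
              (mem_tierKandidaten _ _ _).mpr ⟨pv', (memG pv').mpr ⟨hL', hne'⟩, h2, rfl⟩
            rw [hE] at this
            exact absurd this (List.not_mem_nil)
          · have : (pv'.1, PySem.Str.len pv'.2) ∈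
                tierKandidaten (L.filter (fun pv => !(pv.2 == "")))
                  (fun v => PySem.Str.startswith v z) :=
              (mem_tierKandidaten _ _ _).mpr ⟨pv', (memG pv').mpr ⟨hL', hne'⟩, h3, rfl⟩
            rw [hP] at this
            exact absurd this (List.not_mem_nil)
          · have : (pv'.1, PySem.Str.len pv'.2) ∈
                tierKandidaten (L.filter (fun pv => !(pv.2 == "")))
                  (fun v => PySem.Str.isIn z v) :=
              (mem_tierKandidaten _ _ _).mpr ⟨pv', (memG pv').mpr ⟨hL', hne'⟩, h4, rfl⟩
            rw [hS] at this
            exact absurd this (List.not_mem_nil)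

-- tiered_eq restated with a still-generic candidate list, phrased via genormeerd
theorem tiered_eq2 (z : String) (kand : List (Int × String)) :
    ((kand.map (fun pw => (pw.1, normZoek pw.2))).filterMap (scO z)).foldl upd3 none =
      (match minTreffer (tierKandidaten (genormeerd kand) (fun v => v == z)) with
       | some m => some (0, m.1, m.2)
       | none =>
         match minTreffer (tierKandidaten (genormeerd kand)
             (fun v => PySem.Str.startswith v z)) with
         | some m => some (1, m.1, m.2)
         | none =>
           match minTreffer (tierKandidaten (genormeerd kand)
               (fun v => PySem.Str.isIn z v)) with
           | some m => some (2, m.1, m.2)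
           | none => none) :=
  tiered_eq z (kand.map (fun pw => (pw.1, normZoek pw.2)))

-- ===== VERDICT (by name: the statement is the Claim_ definition above) =====
theorem deelzoekscore_py_spec : Claim_equal_deelzoekscore_py := by
  intro bus z _
  show deelzoekscore_py bus z = deelzoekscore_py_alt bus z
  rw [deelzoekscore_py]
  unfold deelzoekscore_py_alt
  rw [foldl_scoreStap_eq]
  exact tiered_eq2 z (kandidaten bus)
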